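-- pv_equiv track=rewrite | github.com/ScottyXBlaze/a-maze-ing | ex2/data_pipeline.py | _validate_one
-- ===== SOURCE A (Python) =====
-- from typing import Any, Protocol
--
-- def _validate_one(data: Any) -> bool:
--     if isinstance(data, dict):
--         if set(data.keys()) == {"log_level", "log_message"}:
--             for value in data.values():
--                 if isinstance(value, str):
--                     continue
--                 else:
--                     return False
--             return True
--     return False
-- ===== SOURCE B (Python) =====
-- def _validate_one(data) -> bool:
--     # Single pass over the items with two "already consumed" flags:
--     # each item must be a string value under one of the two expected keys,
--     # each key consumed at most once; at the end both must have been seen.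
--     if not isinstance(data, dict):
--         return False
--     seen_level = False
--     seen_message = False
--     for key, value in data.items():
--         if not isinstance(value, str):
--             return False
--         if key == "log_level" and not seen_level:
--             seen_level = True
--         elif key == "log_message" and not seen_message:
--             seen_message = True
--         else:
--             return False
--     return seen_level and seen_message
-- ===== Notes on version B (the rewrite author's own statement) =====
-- stated objective: alternative
-- what changed: Replaces A's build-a-key-set-and-compare plus a separate loop over the values with one fold over the items carrying two seen-flags: each item is consumed as one of the two expected keys (rejecting anything else and returning early), and both flags must be set at the end.
import Mathlib
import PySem

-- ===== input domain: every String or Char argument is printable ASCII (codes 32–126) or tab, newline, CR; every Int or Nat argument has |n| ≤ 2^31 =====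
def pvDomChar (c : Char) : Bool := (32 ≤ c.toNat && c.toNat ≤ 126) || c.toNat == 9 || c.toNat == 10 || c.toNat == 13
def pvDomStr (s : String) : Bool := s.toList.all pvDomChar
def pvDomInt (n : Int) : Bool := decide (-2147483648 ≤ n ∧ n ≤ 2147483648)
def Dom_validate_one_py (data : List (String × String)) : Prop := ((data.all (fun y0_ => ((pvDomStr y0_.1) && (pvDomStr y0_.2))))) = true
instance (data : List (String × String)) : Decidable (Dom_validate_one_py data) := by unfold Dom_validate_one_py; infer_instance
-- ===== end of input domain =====

-- B replaces A's key-set construction + value loop with a single fold over the items carrying two seen-flags (alternative decomposition; equal return values).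


-- ===== PORT A =====
-- 'for value in data.values(): if isinstance(value, str): continue else: return False; return True'
-- at this type every value is a String, so the isinstance branch always continues (exact: the loop body has no other effect).
def pvValuesLoop : List String → Bool
  | [] => true
  | _v :: rest => pvValuesLoop rest

def validate_one_py (data : List (String × String)) : Bool :=
  -- isinstance(data, dict) is true at this type
  if PySem.Set.equal (PySem.Set.ofList (data.map Prod.fst))
       (PySem.Set.ofList ["log_level", "log_message"]) then
    pvValuesLoop (data.map Prod.snd)
  else false

-- ===== PORT B =====
-- the loop of Source B over data.items() with the two flags;
-- 'isinstance(value, str)' is always true at this type, so that early return never fires.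
def pvScan : List (String × String) → Bool → Bool → Bool
  | [], sl, sm => sl && sm
  | (k, _v) :: rest, sl, sm =>
      if k == "log_level" && !sl then pvScan rest true sm
      else if k == "log_message" && !sm then pvScan rest sl true
      else false

def validate_one_py_alt (data : List (String × String)) : Bool :=
  pvScan data false false

-- ===== PRECONDITION & SPEC =====
-- Pre_ excludes association lists with duplicate keys, which encode no Python dict (every dict input satisfies Pre_).
def Pre_validate_one_py (data : List (String × String)) : Prop := (data.map Prod.fst).Nodup
instance (data : List (String × String)) : Decidable (Pre_validate_one_py data) := by unfold Pre_validate_one_py; infer_instance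
def pvWitness_validate_one_py : (List (String × String)) := [("log_level", "a"), ("log_message", "b")]
def Spec_validate_one_py (data : List (String × String)) (out : Bool) : Prop := out = validate_one_py_alt data
instance (data : List (String × String)) (out : Bool) : Decidable (Spec_validate_one_py data out) := by unfold Spec_validate_one_py; infer_instance

-- ===== CLAIM (what is proved, stated in full; the proofs are below) =====
def Claim_equal_validate_one_py : Prop := ∀ (data : List (String × String)), Dom_validate_one_py data → Pre_validate_one_py data → Spec_validate_one_py data (validate_one_py data)

-- ===== LEMMAS AND PROOFS =====

theorem pvValuesLoop_true (l : List String) : pvValuesLoop l = true := by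
  induction l with
  | nil => rfl
  | cons v rest ih => simpa [pvValuesLoop] using ih

-- the keys still to be consumed, given the two flags
def pvMissing (sl sm : Bool) : List String :=
  (if sl then [] else ["log_level"]) ++ (if sm then [] else ["log_message"])

theorem pvScan_true_iff (l : List (String × String)) :
    ∀ sl sm, pvScan l sl sm = true ↔ (l.map Prod.fst).Perm (pvMissing sl sm) := by
  induction l with
  | nil =>
      intro sl sm
      cases sl <;> cases sm <;> simp [pvScan, pvMissing]
  | cons p rest ih =>
      rcases p with ⟨k, v⟩
      intro sl sm
      by_cases h1 : k = "log_level" ∧ sl = false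
      · obtain ⟨rfl, rfl⟩ := h1
        have hstep : pvScan (("log_level", v) :: rest) false sm = pvScan rest true sm := by
          simp [pvScan]
        have hm : pvMissing false sm = "log_level" :: pvMissing true sm := by
          cases sm <;> simp [pvMissing]
        rw [hstep, ih true sm, hm]
        simp [List.perm_cons]
      · by_cases h2 : k = "log_message" ∧ sm = false
        · obtain ⟨rfl, rfl⟩ := h2
          have hstep : pvScan (("log_message", v) :: rest) sl false = pvScan rest sl true := by
            rcases (not_and_or.1 h1) with h | h
            · cases sl <;> simp [pvScan]
            · have : sl = true := by revert h; cases sl <;> simp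
              subst this; simp [pvScan]
          have hm : (pvMissing sl false).Perm ("log_message" :: pvMissing sl true) := by
            cases sl <;> simp [pvMissing] <;> decide
          rw [hstep, ih sl true]
          constructor
          · intro h; exact ((List.perm_cons "log_message").2 h).trans hm.symm
          · intro h; exact (List.perm_cons "log_message").1 (h.trans hm)
        · have hc1 : (k == "log_level" && !sl) = false := by
            rcases (not_and_or.1 h1) with h | h
            · simp [h]
            · have : sl = true := by revert h; cases sl <;> simp
              simp [this]
          have hc2 : (k == "log_message" && !sm) = false := by
            rcases (not_and_or.1 h2) with h | h
            · simp [h]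
            · have : sm = true := by revert h; cases sm <;> simp
              simp [this]
          have hstep : pvScan ((k, v) :: rest) sl sm = false := by
            simp [pvScan, hc1, hc2]
          rw [hstep]
          constructor
          · intro h; exact absurd h (by simp)
          · intro hperm
            exfalso
            have hk : k ∈ pvMissing sl sm := hperm.mem_iff.1 (by simp)
            have : (sl = false ∧ k = "log_level") ∨ (sm = false ∧ k = "log_message") := by
              revert hk; cases sl <;> cases sm <;> simp [pvMissing]
            rcases this with ⟨hs, hk⟩ | ⟨hs, hk⟩
            · exact h1 ⟨hk, hs⟩
            · exact h2 ⟨hk, hs⟩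

theorem lookupless_keys_perm (keys : List String) (hnd : keys.Nodup) :
    (∀ x, x ∈ keys ↔ x ∈ (["log_level", "log_message"] : List String)) ↔
      keys.Perm ["log_level", "log_message"] := by
  constructor
  · intro h
    exact (List.perm_ext_iff_of_nodup hnd (by decide)).2 h
  · intro h x
    exact ⟨fun hx => h.mem_iff.1 hx, fun hx => h.mem_iff.2 hx⟩

-- ===== VERDICT (by name: the statement is the Claim_ definition above) =====
theorem validate_one_py_spec : Claim_equal_validate_one_py := by
  intro data _ hpre
  unfold Spec_validate_one_py validate_one_py validate_one_py_alt
  rw [Bool.eq_iff_iff, pvScan_true_iff]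
  have hmiss : pvMissing false false = ["log_level", "log_message"] := by rfl
  rw [hmiss]
  have hset := PySem.Set.equal_iff (PySem.Set.ofList (data.map Prod.fst))
      (PySem.Set.ofList (["log_level", "log_message"] : List String))
  constructor
  · intro h
    split at h
    · rename_i hs
      have hmem : ∀ x, x ∈ data.map Prod.fst ↔ x ∈ (["log_level", "log_message"] : List String) := by
        intro x
        simpa [PySem.Set.mem_ofList] using (hset.1 hs) x
      exact (lookupless_keys_perm _ hpre).1 hmem
    · exact absurd h (by simp)
  · intro h
    have hs : PySem.Set.equal (PySem.Set.ofList (data.map Prod.fst))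
        (PySem.Set.ofList (["log_level", "log_message"] : List String)) = true := by
      apply hset.2
      intro x
      simpa [PySem.Set.mem_ofList] using (lookupless_keys_perm _ hpre).2 h x
    rw [if_pos hs]
    exact pvValuesLoop_true _
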